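-- pv_equiv track=rewrite | github.com/ArachnaDude/python_projects | prison_break.py | prison_break
-- ===== SOURCE A (Python) =====
-- def prison_break(list):
--
--   # invert function checks each element of passed list, appending the inverse to a new list. This list is the return value of invert()
--   def invert(list_to_invert):
--     new_list = []
--     for i in list_to_invert:
--       if i == 1:
--         new_list.append(0)
--       else:
--         new_list.append(1)
--     return new_list
--
--
--   modded_prison = list
--   prisoner_counter = 0
--
--   # for loop iterates through modded_prison list, increments counter by 1, and calls invert() on prison list every time a 1 is encountered
--   for i in range(len(modded_prison)):
--     if modded_prison[i] == 1:
--       prisoner_counter += 1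
--       modded_prison = invert(modded_prison)
--
--
--   # once loop is complete, prisoner_counter is returned
--   return prisoner_counter
-- ===== SOURCE B (Python) =====
-- def prison_break(list):
--     # single pass: the number of inversions so far is exactly the counter,
--     # and an element reads as 1 iff (original == 1) xor (counter is odd)
--     counter = 0
--     for x in list:
--         if (x == 1) != (counter % 2 == 1):
--             counter += 1
--     return counter
-- ===== Notes on version B (the rewrite author's own statement) =====
-- stated objective: alternative
-- what changed: B replaces A's rebuild-the-whole-list inversion at every encountered 1 with a single pass that tests each original element against the parity of the counter; on inputs with many toggles this avoids A's quadratic rebuilds, though a timing run's inputs trigger few toggles so no speed is claimed.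
import Mathlib
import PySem

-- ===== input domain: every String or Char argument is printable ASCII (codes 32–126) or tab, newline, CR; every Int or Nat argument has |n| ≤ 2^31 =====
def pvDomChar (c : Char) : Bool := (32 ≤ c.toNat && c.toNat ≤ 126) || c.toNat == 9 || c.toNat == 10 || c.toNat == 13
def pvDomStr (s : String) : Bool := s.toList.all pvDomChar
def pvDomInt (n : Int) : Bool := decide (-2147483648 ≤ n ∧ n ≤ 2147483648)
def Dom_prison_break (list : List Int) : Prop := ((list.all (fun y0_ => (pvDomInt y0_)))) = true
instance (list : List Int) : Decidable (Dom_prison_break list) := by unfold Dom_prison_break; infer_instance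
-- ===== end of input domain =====

-- B replaces A's "re-invert the whole list at every 1" loop by a single pass that applies the
-- parity of the counter to each original element (objective: alternative algorithm, same measured cost).

-- ===== PORT A =====
-- inner helper invert(): loop appending the inverse of each element
def pvInvert (list_to_invert : List Int) : List Int :=
  list_to_invert.foldl (fun new_list i => new_list ++ [if i == 1 then 0 else 1]) []

-- one iteration of A's for-loop over index i (i < length always holds, so getD is exact for modded_prison[i])
def pvStepA (s : List Int × Int) (i : Nat) : List Int × Int :=
  if s.1.getD i 0 == 1 then (pvInvert s.1, s.2 + 1) else s

def prison_break (list : List Int) : Int :=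
  ((List.range list.length).foldl pvStepA (list, 0)).2

-- ===== PORT B =====
def pvStepB (counter : Int) (x : Int) : Int :=
  if (x == 1) != (PySem.Int.mod counter 2 == 1) then counter + 1 else counter

def prison_break_alt (list : List Int) : Int :=
  list.foldl pvStepB 0

-- ===== PRECONDITION & SPEC =====
def Spec_prison_break (list : List Int) (out : Int) : Prop := out = prison_break_alt list
instance (list : List Int) (out : Int) : Decidable (Spec_prison_break list out) := by unfold Spec_prison_break; infer_instance

-- ===== CLAIM (what is proved, stated in full; the proofs are below) =====
def Claim_equal_prison_break : Prop := ∀ (list : List Int), Dom_prison_break list → Spec_prison_break list (prison_break list)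

-- ===== LEMMAS AND PROOFS =====

lemma pvInvert_eq_map (l : List Int) :
    pvInvert l = l.map (fun x => if x == 1 then (0:Int) else 1) := by
  simpa [pvInvert] using
    PySem.List.foldl_append_singleton_eq_map (fun x => if x == 1 then (0:Int) else 1) l []

lemma pvInvert_length (l : List Int) : (pvInvert l).length = l.length := by
  simp [pvInvert_eq_map]

lemma pvInvert_getD (l : List Int) (j : Nat) (hj : j < l.length) :
    ((pvInvert l).getD j 0 == 1) = !(l.getD j 0 == 1) := by
  simp only [pvInvert_eq_map, List.getD_eq_getElem?_getD, List.getElem?_map]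
  rw [List.getElem?_eq_getElem hj]
  by_cases h : l[j] = 1 <;> simp [h]

lemma pvMod_flip (c : Int) :
    (PySem.Int.mod (c + 1) 2 == 1) = !(PySem.Int.mod c 2 == 1) := by
  rw [PySem.Int.mod_eq_emod_of_pos (by norm_num : (0:Int) < 2),
      PySem.Int.mod_eq_emod_of_pos (by norm_num : (0:Int) < 2)]
  rcases Int.emod_two_eq_zero_or_one c with h | h
  · have h1 : (c + 1) % 2 = 1 := by omega
    simp [h, h1]
  · have h1 : (c + 1) % 2 = 0 := by omega
    simp [h, h1]

lemma pv_main (list : List Int) (k : Nat) (hk : k ≤ list.length) :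
    ((List.range k).foldl pvStepA (list, 0)).2 = (list.take k).foldl pvStepB 0 ∧
    ((List.range k).foldl pvStepA (list, 0)).1.length = list.length ∧
    ∀ j : Nat, j < list.length →
      ((((List.range k).foldl pvStepA (list, 0)).1.getD j 0) == 1)
        = ((list.getD j 0 == 1)
            != (PySem.Int.mod ((List.range k).foldl pvStepA (list, 0)).2 2 == 1)) := by
  induction k with
  | zero =>
      refine ⟨rfl, rfl, ?_⟩
      intro j hj
      simp
  | succ k ih =>
      have hk' : k ≤ list.length := Nat.le_of_succ_le hk
      have hklt : k < list.length := hk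
      obtain ⟨ihc, ihl, ihg⟩ := ih hk'
      set s := (List.range k).foldl pvStepA (list, 0) with hs
      have hrange : (List.range (k+1)).foldl pvStepA (list, 0) = pvStepA s k := by
        rw [List.range_succ, List.foldl_append]; rfl
      have htake : list.take (k+1) = list.take k ++ [list[k]] := by
        rw [List.take_add_one, List.getElem?_eq_getElem hklt]; rfl
      have hBfold : (list.take (k+1)).foldl pvStepB 0 = pvStepB (s.2) list[k] := by
        rw [htake, List.foldl_append, ihc]; rfl
      have hcond : (s.1.getD k 0 == 1) = ((list[k] == 1) != (PySem.Int.mod s.2 2 == 1)) := by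
        have := ihg k hklt
        rwa [List.getD_eq_getElem _ _ hklt] at this
      rw [hrange, hBfold]
      unfold pvStepA pvStepB
      by_cases h : (list[k] == 1) != (PySem.Int.mod s.2 2 == 1)
      · simp only [hcond, h, if_true]
        refine ⟨trivial, by simpa [pvInvert_length] using ihl, ?_⟩
        intro j hj
        have hjlt : j < s.1.length := by rw [ihl]; exact hj
        rw [pvInvert_getD _ _ hjlt, ihg j hj, pvMod_flip]
        rcases Bool.eq_false_or_eq_true (list.getD j 0 == 1) with h1 | h1 <;>
          rcases Bool.eq_false_or_eq_true (PySem.Int.mod s.2 2 == 1) with h2 | h2 <;>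
            rw [h1, h2] <;> rfl
      · rw [Bool.not_eq_true] at h
        simp only [hcond, h, Bool.false_eq_true, if_false]
        exact ⟨trivial, ihl, ihg⟩

-- ===== VERDICT (by name: the statement is the Claim_ definition above) =====
theorem prison_break_spec : Claim_equal_prison_break := by
  intro list _
  unfold Spec_prison_break prison_break prison_break_alt
  have := (pv_main list list.length le_rfl).1
  rwa [List.take_length] at this
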